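-- pv_equiv track=rewrite | github.com/mshadianto/strive | api_integration_guide.py | calculate_pss10_score
-- ===== SOURCE A (Python) =====
-- from typing import List, Optional, Dict, Any
--
-- def calculate_pss10_score(answers: List[int]) -> int:
--     """Calculate PSS-10 score"""
--     reversed_indices = [3, 4, 6, 7]
--     total_score = 0
--
--     for i, score in enumerate(answers):
--         if i in reversed_indices:
--             total_score += (4 - score)
--         else:
--             total_score += score
--
--     return total_score
-- ===== SOURCE B (Python) =====
-- def calculate_pss10_score(answers):
--     """Calculate PSS-10 score"""
--     total = sum(answers)
--     for i in (3, 4, 6, 7):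
--         if i < len(answers):
--             total += 4 - 2 * answers[i]
--     return total
-- ===== Notes on version B (the rewrite author's own statement) =====
-- stated objective: simpler
-- what changed: Replaces the per-element enumerate loop with a branch test by a plain sum(answers) plus a correction term 4-2*answers[i] added only at the four reverse-scored indices that exist.
import Mathlib
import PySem

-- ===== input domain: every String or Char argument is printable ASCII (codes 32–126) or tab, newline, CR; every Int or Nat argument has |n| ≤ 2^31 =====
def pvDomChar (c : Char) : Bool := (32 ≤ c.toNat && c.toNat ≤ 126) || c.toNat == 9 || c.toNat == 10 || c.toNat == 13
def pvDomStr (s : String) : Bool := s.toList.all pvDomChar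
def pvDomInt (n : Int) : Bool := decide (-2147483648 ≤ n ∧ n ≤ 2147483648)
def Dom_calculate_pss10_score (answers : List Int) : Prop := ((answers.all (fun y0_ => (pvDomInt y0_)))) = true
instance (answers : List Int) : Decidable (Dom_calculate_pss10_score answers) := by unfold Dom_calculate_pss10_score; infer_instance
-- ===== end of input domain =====

-- B replaces A's per-element enumerate loop (branching on reversed indices) by sum(answers)
-- plus a correction 4 - 2*answers[i] at the four reverse-scored indices that exist (simpler).

-- ===== PORT A =====
-- the enumerate loop of A, carrying the running index i and the accumulator total_score
def pssLoopA : Nat → Int → List Int → Int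
  | _, acc, [] => acc
  | i, acc, s :: rest =>
      pssLoopA (i + 1)
        (if (i : Int) ∈ ([3, 4, 6, 7] : List Int) then acc + (4 - s) else acc + s) rest

def calculate_pss10_score (answers : List Int) : Int := pssLoopA 0 0 answers

-- ===== PORT B =====
def calculate_pss10_score_alt (answers : List Int) : Int :=
  ([3, 4, 6, 7] : List Nat).foldl
    (fun total i => if i < answers.length then total + (4 - 2 * answers.getD i 0) else total)
    answers.sum

-- ===== PRECONDITION & SPEC =====
def Spec_calculate_pss10_score (answers : List Int) (out : Int) : Prop := out = calculate_pss10_score_alt answers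
instance (answers : List Int) (out : Int) : Decidable (Spec_calculate_pss10_score answers out) := by unfold Spec_calculate_pss10_score; infer_instance

-- ===== CLAIM (what is proved, stated in full; the proofs are below) =====
def Claim_equal_calculate_pss10_score : Prop := ∀ (answers : List Int), Dom_calculate_pss10_score answers → Spec_calculate_pss10_score answers (calculate_pss10_score answers)

-- ===== LEMMAS AND PROOFS =====

lemma pssLoopA_ge8 (xs : List Int) : ∀ (i : Nat) (acc : Int), 8 ≤ i →
    pssLoopA i acc xs = acc + xs.sum := by
  induction xs with
  | nil => intro i acc _; simp [pssLoopA]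
  | cons s rest ih =>
      intro i acc hi
      have hnot : ¬ ((i : Int) ∈ ([3, 4, 6, 7] : List Int)) := by
        simp only [List.mem_cons, List.not_mem_nil, or_false]
        omega
      simp only [pssLoopA, if_neg hnot]
      rw [ih (i+1) (acc + s) (by omega)]
      simp [List.sum_cons]; ring

-- ===== VERDICT (by name: the statement is the Claim_ definition above) =====
theorem calculate_pss10_score_spec : Claim_equal_calculate_pss10_score := by
  unfold Claim_equal_calculate_pss10_score
  intro answers _
  unfold Spec_calculate_pss10_score calculate_pss10_score calculate_pss10_score_alt
  match answers with
  | [] => decide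
  | [a] => simp [pssLoopA, List.foldl]; try omega
  | [a, b] => simp [pssLoopA, List.foldl]; try omega
  | [a, b, c] => simp [pssLoopA, List.foldl]; try omega
  | [a, b, c, d] => simp [pssLoopA, List.foldl, List.getD]; try omega
  | [a, b, c, d, e] => simp [pssLoopA, List.foldl, List.getD]; try omega
  | [a, b, c, d, e, f] => simp [pssLoopA, List.foldl, List.getD]; try omega
  | [a, b, c, d, e, f, g] => simp [pssLoopA, List.foldl, List.getD]; try omega
  | a :: b :: c :: d :: e :: f :: g :: h :: rest =>
      simp only [pssLoopA, List.foldl, List.getD, List.length_cons]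
      norm_num
      rw [pssLoopA_ge8 rest 8 _ (by omega)]
      omega
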